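-- pv_equiv track=rewrite | github.com/GNOME/adwaita-icon-theme | src/cursors/anicursorgen.py | frames_have_animation
-- ===== SOURCE A (Python) =====
-- def frames_have_animation (frames):
--   sizes = set ()
--
--   for frame in frames:
--     if frame[4] == 0:
--       continue
--     if frame[0] in sizes:
--       return True
--     sizes.add (frame[0])
--
--   return False
-- ===== SOURCE B (Python) =====
-- def frames_have_animation(frames):
--     sizes = sorted(frame[0] for frame in frames if frame[4] != 0)
--     return any(a == b for a, b in zip(sizes, sizes[1:]))
-- ===== Notes on version B (the rewrite author's own statement) =====
-- stated objective: alternative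
-- what changed: Replaces the incremental hash-set with early exit by sort-then-scan: collect eligible sizes, sort them, and report a duplicate iff some adjacent pair of the sorted list is equal.
import Mathlib
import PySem

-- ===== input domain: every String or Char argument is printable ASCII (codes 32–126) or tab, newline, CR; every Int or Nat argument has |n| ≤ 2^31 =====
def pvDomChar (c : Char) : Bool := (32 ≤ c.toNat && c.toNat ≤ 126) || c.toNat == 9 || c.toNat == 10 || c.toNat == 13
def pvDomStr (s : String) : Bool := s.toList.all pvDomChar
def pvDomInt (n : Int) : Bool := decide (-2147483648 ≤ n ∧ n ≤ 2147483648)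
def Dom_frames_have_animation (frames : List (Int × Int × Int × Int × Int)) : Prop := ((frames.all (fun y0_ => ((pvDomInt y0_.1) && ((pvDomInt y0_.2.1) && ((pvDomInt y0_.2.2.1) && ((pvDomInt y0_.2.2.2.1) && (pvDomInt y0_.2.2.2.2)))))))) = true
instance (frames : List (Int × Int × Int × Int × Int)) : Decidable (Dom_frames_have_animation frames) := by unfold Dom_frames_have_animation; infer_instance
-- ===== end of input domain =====

-- B replaces A's incremental membership set (early exit on the first repeat) by sort-then-scan:
-- collect the eligible sizes, sort them, and report a duplicate iff some adjacent sorted pair is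
-- equal; objective: an alternative algorithm of similar cost (return value only, no mutation).

-- ===== PORT A =====
-- A's loop: for frame in frames: skip if frame[4]==0; return True if frame[0] already seen; else add it
def pvLoopA : List (Int × Int × Int × Int × Int) → PySem.Set Int → Bool
  | [], _ => false
  | f :: rest, sizes =>
    if f.2.2.2.2 == 0 then pvLoopA rest sizes
    else if PySem.Set.contains sizes f.1 then true
    else pvLoopA rest (PySem.Set.add sizes f.1)

def frames_have_animation (frames : List (Int × Int × Int × Int × Int)) : Bool :=
  pvLoopA frames PySem.Set.empty

-- ===== PORT B =====
def frames_have_animation_alt (frames : List (Int × Int × Int × Int × Int)) : Bool :=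
  let sizes := PySem.List.sorted ((frames.filter (fun frame => frame.2.2.2.2 != 0)).map (fun frame => frame.1)) (fun x => x) false
  (sizes.zip (sizes.drop 1)).any (fun p => p.1 == p.2)

-- ===== PRECONDITION & SPEC =====
def Spec_frames_have_animation (frames : List (Int × Int × Int × Int × Int)) (out : Bool) : Prop := out = frames_have_animation_alt frames
instance (frames : List (Int × Int × Int × Int × Int)) (out : Bool) : Decidable (Spec_frames_have_animation frames out) := by unfold Spec_frames_have_animation; infer_instance

-- ===== CLAIM (what is proved, stated in full; the proofs are below) =====
def Claim_equal_frames_have_animation : Prop := ∀ (frames : List (Int × Int × Int × Int × Int)), Dom_frames_have_animation frames → Spec_frames_have_animation frames (frames_have_animation frames)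

-- ===== LEMMAS AND PROOFS =====

-- A's loop restricted to the filtered size list
def pvLoopS : List Int → PySem.Set Int → Bool
  | [], _ => false
  | x :: xs, s =>
    if PySem.Set.contains s x then true
    else pvLoopS xs (PySem.Set.add s x)

theorem pvLoopA_eq_loopS (frames : List (Int × Int × Int × Int × Int)) (s : PySem.Set Int) :
    pvLoopA frames s
      = pvLoopS ((frames.filter (fun frame => frame.2.2.2.2 != 0)).map (fun frame => frame.1)) s := by
  induction frames generalizing s with
  | nil => rfl
  | cons f rest ih =>
    by_cases h : f.2.2.2.2 = 0 <;> simp [pvLoopA, pvLoopS, h, ih]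

-- A's loop says true iff the remaining list has a repeat or meets the seen set
theorem pvLoopS_spec (l : List Int) (s : PySem.Set Int) :
    pvLoopS l s = true ↔ ¬ l.Nodup ∨ ∃ x ∈ l, x ∈ s := by
  induction l generalizing s with
  | nil => simp [pvLoopS]
  | cons x xs ih =>
    by_cases h : x ∈ s
    · simp [pvLoopS, PySem.Set.contains, h]
    · simp only [pvLoopS, PySem.Set.contains, List.contains_eq_mem, h,
        decide_false, Bool.false_eq_true, if_false, ih, List.nodup_cons, List.mem_cons,
        PySem.Set.mem_add]
      constructor
      · rintro (hnd | ⟨y, hy, hys | rfl⟩)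
        · exact Or.inl (fun ⟨_, h2⟩ => hnd h2)
        · exact Or.inr ⟨y, Or.inr hy, hys⟩
        · exact Or.inl (fun ⟨h1, _⟩ => h1 hy)
      · rintro (hnd | ⟨y, (rfl | hy), hys⟩)
        · by_cases hm : x ∈ xs
          · exact Or.inr ⟨x, hm, Or.inr rfl⟩
          · exact Or.inl (fun h2 => hnd ⟨hm, h2⟩)
        · exact absurd hys h
        · exact Or.inr ⟨y, hy, Or.inl hys⟩

-- in a ≤-sorted list, an adjacent equal pair exists iff the list has a duplicate
theorem adjEq_of_pairwise (l : List Int) (hp : l.Pairwise (· ≤ ·)) :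
    ((l.zip (l.drop 1)).any (fun p => p.1 == p.2) = true) ↔ ¬ l.Nodup := by
  induction l with
  | nil => simp
  | cons x xs ih =>
    cases xs with
    | nil => simp
    | cons y t =>
      have hxy : x ≤ y := (List.pairwise_cons.mp hp).1 y (List.mem_cons_self)
      have hp' : (y :: t).Pairwise (· ≤ ·) := (List.pairwise_cons.mp hp).2
      by_cases hxeq : x = y
      · subst hxeq
        simp [List.nodup_cons]
      · have hx_not : x ∉ y :: t := by
          intro hmem
          rcases List.mem_cons.mp hmem with rfl | hmemt
          · exact hxeq rfl
          · have hyx : y ≤ x := (List.pairwise_cons.mp hp').1 x hmemt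
            exact hxeq (le_antisymm hxy hyx)
        simp only [List.drop_one, List.tail_cons, List.zip_cons_cons, List.any_cons,
          Bool.or_eq_true, beq_iff_eq, hxeq, false_or, List.nodup_cons]
        rw [show (y :: t).zip t = (y :: t).zip ((y :: t).drop 1) from rfl, ih hp']
        simp [hx_not]

-- ===== VERDICT (by name: the statement is the Claim_ definition above) =====
theorem frames_have_animation_spec : Claim_equal_frames_have_animation := by
  intro frames _
  unfold Spec_frames_have_animation frames_have_animation frames_have_animation_alt
  rw [pvLoopA_eq_loopS]
  set l := (frames.filter (fun frame => frame.2.2.2.2 != 0)).map (fun frame => frame.1) with hl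
  have hA : pvLoopS l PySem.Set.empty = true ↔ ¬ l.Nodup := by
    rw [pvLoopS_spec]
    simp [PySem.Set.empty]
  have hperm : (PySem.List.sorted l (fun x => x) false).Perm l := PySem.List.sorted_perm l _ _
  have hB := adjEq_of_pairwise (PySem.List.sorted l (fun x => x) false)
    (by simpa using PySem.List.sorted_pairwise l (fun x => x))
  rw [hperm.nodup_iff] at hB
  cases hb : pvLoopS l PySem.Set.empty with
  | true => exact (hB.mpr (hA.mp hb)).symm
  | false =>
    have : l.Nodup := by
      by_contra hnd
      rw [hA.mpr hnd] at hb; exact Bool.true_eq_false.mp hb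
    symm
    rw [Bool.eq_false_iff]
    intro hadj
    exact (hB.mp hadj) this
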